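-- pv_equiv track=rewrite | github.com/Dark-Matterr/Graph-Coloring | color.py | symmetricEdge
-- ===== SOURCE A (Python) =====
-- def symmetricEdge(e):
-- 	info = []
-- 	x = 0
-- 	for i in range(len(e)):
-- 		for j in range(len(e)):
-- 			if e[i][j] >= 1:
-- 				info.append([j, i])
-- 				try:
-- 					info.remove([i, j])
-- 				except:
-- 					pass
-- 	return info
-- ===== SOURCE B (Python) =====
-- def symmetricEdge(e):
--     n = len(e)
--     return [[j, i] for i in range(n) for j in range(n)
--             if e[i][j] >= 1 and not (j >= i and e[j][i] >= 1)]
-- ===== Notes on version B (the rewrite author's own statement) =====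
-- stated objective: alternative
-- what changed: A appends [j,i] and then scans the whole list with list.remove to cancel the reverse edge; B is a single comprehension that appends [j,i] only when the reverse edge does not cancel it (e[i][j]>=1 and not (j>=i and e[j][i]>=1)), so the remove scans disappear.
import Mathlib
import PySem

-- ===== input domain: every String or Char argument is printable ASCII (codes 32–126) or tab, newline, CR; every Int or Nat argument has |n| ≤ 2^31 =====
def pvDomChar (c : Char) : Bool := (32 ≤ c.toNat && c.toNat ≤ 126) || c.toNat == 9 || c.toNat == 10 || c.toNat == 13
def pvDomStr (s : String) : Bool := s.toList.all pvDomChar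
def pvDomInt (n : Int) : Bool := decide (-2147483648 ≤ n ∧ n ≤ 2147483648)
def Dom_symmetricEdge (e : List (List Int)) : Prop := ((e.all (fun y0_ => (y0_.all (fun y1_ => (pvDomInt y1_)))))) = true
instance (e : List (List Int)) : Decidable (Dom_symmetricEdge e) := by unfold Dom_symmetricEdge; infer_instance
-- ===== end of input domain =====

-- B replaces A's append-then-list.remove cancellation by a single pass that appends [j, i]
-- only when the reverse edge does not cancel it (objective: alternative).

-- ===== PORT A =====
def symmetricEdge (e : List (List Int)) : List (List Int) :=
  (PySem.List.pyRange 0 (e.length : Int) 1).foldl (fun info i =>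
    (PySem.List.pyRange 0 (e.length : Int) 1).foldl (fun info j =>
      if PySem.List.pyGetD (PySem.List.pyGetD e i []) j 0 ≥ 1 then
        -- info.append([j, i]); try: info.remove([i, j]) except: pass
        match PySem.List.remove? (info ++ [[j, i]]) [i, j] with
        | some l => l
        | none => info ++ [[j, i]]
      else info) info) []

-- ===== PORT B =====
def symmetricEdge_alt (e : List (List Int)) : List (List Int) :=
  (PySem.List.pyRange 0 (e.length : Int) 1).flatMap (fun i =>
    (PySem.List.pyRange 0 (e.length : Int) 1).filterMap (fun j =>
      if PySem.List.pyGetD (PySem.List.pyGetD e i []) j 0 ≥ 1 ∧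
         ¬ (j ≥ i ∧ PySem.List.pyGetD (PySem.List.pyGetD e j []) i 0 ≥ 1)
      then some [j, i] else none))

-- ===== PRECONDITION & SPEC =====
-- Pre_ excludes exactly the ragged matrices on which Python A raises IndexError at e[i][j].
def Pre_symmetricEdge (e : List (List Int)) : Prop := ∀ row ∈ e, e.length ≤ row.length
instance (e : List (List Int)) : Decidable (Pre_symmetricEdge e) := by unfold Pre_symmetricEdge; infer_instance
def pvWitness_symmetricEdge : List (List Int) := [[0, 1], [1, 0]]

def Spec_symmetricEdge (e : List (List Int)) (out : List (List Int)) : Prop := out = symmetricEdge_alt e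
instance (e : List (List Int)) (out : List (List Int)) : Decidable (Spec_symmetricEdge e out) := by unfold Spec_symmetricEdge; infer_instance

-- ===== CLAIM (what is proved, stated in full; the proofs are below) =====
def Claim_equal_symmetricEdge : Prop := ∀ (e : List (List Int)), Dom_symmetricEdge e → Pre_symmetricEdge e → Spec_symmetricEdge e (symmetricEdge e)

-- ===== LEMMAS AND PROOFS =====

-- Strict lexicographic order on index pairs: the iteration order of the double loop.
def pvLex (p q : Int × Int) : Prop := p.1 < q.1 ∨ (p.1 = q.1 ∧ p.2 < q.2)

-- One iteration of A's loop body, on the pair (i, j) = (p.1, p.2).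
def pvStep (g : Int → Int → Int) (info : List (List Int)) (p : Int × Int) : List (List Int) :=
  if g p.1 p.2 ≥ 1 then
    match PySem.List.remove? (info ++ [[p.2, p.1]]) [p.1, p.2] with
    | some l => l
    | none => info ++ [[p.2, p.1]]
  else info

-- Which entry the pair p contributes after the prefix Q of iterations has run.
def pvF (g : Int → Int → Int) (Q : List (Int × Int)) (p : Int × Int) : Option (List Int) :=
  if g p.1 p.2 ≥ 1 ∧ ¬ (p.2 ≥ p.1 ∧ g p.2 p.1 ≥ 1 ∧ (p.2, p.1) ∈ Q) then some [p.2, p.1] else none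

theorem pvF_eq_some {g : Int → Int → Int} {Q : List (Int × Int)} {p : Int × Int} {v : List Int}
    (h : pvF g Q p = some v) :
    v = [p.2, p.1] ∧ g p.1 p.2 ≥ 1 ∧ ¬ (p.2 ≥ p.1 ∧ g p.2 p.1 ≥ 1 ∧ (p.2, p.1) ∈ Q) := by
  unfold pvF at h
  split_ifs at h with hc
  exact ⟨(Option.some.injEq _ _ ▸ h).symm, hc⟩

theorem pv_mem_filterMap {g : Int → Int → Int} {Q : List (Int × Int)} {i j : Int}
    (hij : (i, j) ∉ Q) :
    [i, j] ∈ Q.filterMap (pvF g Q) ↔ ((j, i) ∈ Q ∧ g j i ≥ 1) := by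
  rw [List.mem_filterMap]
  constructor
  · rintro ⟨p, hp, hf⟩
    obtain ⟨hv, hg, -⟩ := pvF_eq_some hf
    have h2 : i = p.2 ∧ j = p.1 := by simpa using hv
    obtain ⟨h2a, h2b⟩ := h2
    have hpe : p = (j, i) := by
      obtain ⟨a, b⟩ := p; simp_all
    subst hpe
    exact ⟨hp, by simpa using hg⟩
  · rintro ⟨hmem, hg⟩
    refine ⟨(j, i), hmem, ?_⟩
    unfold pvF
    simp only [ge_iff_le]
    rw [if_pos]
    constructor
    · simpa using hg
    · simp only [not_and]
      intro _ _ hmem2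
      exact hij hmem2

theorem pv_erase_filterMap {α β : Type} [BEq β] [LawfulBEq β] (Q : List α) (f f' : α → Option β)
    (q0 : α) (v : β) (hmem : q0 ∈ Q) (hnd : Q.Nodup)
    (hne : ∀ p ∈ Q, p ≠ q0 → f' p = f p) (hq : f q0 = some v) (hq' : f' q0 = none)
    (huniq : ∀ p ∈ Q, f p = some v → p = q0) :
    (Q.filterMap f).erase v = Q.filterMap f' := by
  induction Q with
  | nil => cases hmem
  | cons a Q ih =>
    by_cases ha : a = q0
    · subst ha
      have hQ : a ∉ Q := (List.nodup_cons.mp hnd).1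
      rw [List.filterMap_cons_some hq, List.erase_cons_head,
          List.filterMap_cons_none hq']
      exact (List.filterMap_congr (fun p hp => hne p (List.mem_cons_of_mem _ hp)
        (fun h => hQ (h ▸ hp)))).symm
    · have hmem' : q0 ∈ Q := (List.mem_cons.mp hmem).resolve_left (fun h => ha h.symm)
      have hnd' : Q.Nodup := (List.nodup_cons.mp hnd).2
      have hfa : f' a = f a := hne a List.mem_cons_self ha
      have ihx := ih hmem' hnd' (fun p hp => hne p (List.mem_cons_of_mem _ hp))
        (fun p hp => huniq p (List.mem_cons_of_mem _ hp))
      cases hfa' : f a with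
      | none => rw [List.filterMap_cons_none hfa', List.filterMap_cons_none (hfa.trans hfa'), ihx]
      | some w =>
        have hwv : w ≠ v := fun h => ha (huniq a List.mem_cons_self (h ▸ hfa'))
        rw [List.filterMap_cons_some hfa', List.filterMap_cons_some (hfa.trans hfa'),
            List.erase_cons_tail (by simpa using fun h => (hwv h).elim), ihx]

theorem pv_nodup (Q : List (Int × Int)) (h : Q.Pairwise pvLex) : Q.Nodup :=
  h.imp (fun {a b} hab => by rintro rfl; unfold pvLex at hab; omega)

-- pvF is unchanged by appending the pair (i, j) to Q, except possibly at the pair (j, i)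
theorem pv_shift (g : Int → Int → Int) (Q : List (Int × Int)) (i j : Int)
    (p : Int × Int) (hne : p ≠ (j, i)) : pvF g (Q ++ [(i, j)]) p = pvF g Q p := by
  have hmemiff : ((p.2, p.1) ∈ Q ++ [(i, j)]) ↔ ((p.2, p.1) ∈ Q) := by
    rw [List.mem_append]
    constructor
    · rintro (h | h)
      · exact h
      · exfalso; apply hne
        have : p.2 = i ∧ p.1 = j := by simpa using h
        obtain ⟨a, b⟩ := p; simp_all
    · exact Or.inl
  simp only [pvF, hmemiff]

theorem pv_congr_aux (g : Int → Int → Int) (Q : List (Int × Int)) (i j : Int)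
    (hcase : (j, i) ∈ Q → pvF g (Q ++ [(i, j)]) (j, i) = pvF g Q (j, i)) :
    Q.filterMap (pvF g (Q ++ [(i, j)])) = Q.filterMap (pvF g Q) := by
  apply List.filterMap_congr
  intro p hp
  by_cases hpji : p = (j, i)
  · subst hpji; exact hcase hp
  · exact pv_shift g Q i j p hpji

theorem pv_core (g : Int → Int → Int) (P : List (Int × Int)) (h : P.Pairwise pvLex) :
    P.foldl (pvStep g) [] = P.filterMap (pvF g P) := by
  induction P using List.reverseRecOn with
  | nil => simp
  | append_singleton Q q IH =>
    rw [List.pairwise_append] at h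
    obtain ⟨hQ, -, hlt⟩ := h
    have hq : ∀ a ∈ Q, pvLex a q := fun a ha => hlt a ha q (List.mem_singleton.mpr rfl)
    obtain ⟨i, j⟩ := q
    have hijQ : (i, j) ∉ Q := fun hm => by
      have h2 := hq _ hm; unfold pvLex at h2; simp only [] at h2; omega
    have hjiQ : j ≥ i → (j, i) ∉ Q := fun hge hm => by
      have h2 := hq _ hm; unfold pvLex at h2; simp only [] at h2; omega
    rw [List.foldl_append, List.foldl_cons, List.foldl_nil, IH hQ, List.filterMap_append]
    by_cases hgij : g i j ≥ 1
    · by_cases hij_eq : j = i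
      · -- diagonal: append then immediately remove the same element
        subst hij_eq
        have hnotL : [j, j] ∉ Q.filterMap (pvF g Q) := by
          rw [pv_mem_filterMap hijQ]; rintro ⟨hm, -⟩; exact hijQ hm
        have hmem : [j, j] ∈ Q.filterMap (pvF g Q) ++ [[j, j]] := by simp
        have hrm : PySem.List.remove? (Q.filterMap (pvF g Q) ++ [[j, j]]) [j, j]
            = some (Q.filterMap (pvF g Q)) := by
          rw [PySem.List.remove?_eq_some_erase _ _ hmem, List.erase_append_right _ hnotL]
          simp
        have hF : pvF g (Q ++ [(j, j)]) (j, j) = none := by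
          unfold pvF
          rw [if_neg]
          rintro ⟨-, hno⟩
          exact hno ⟨le_refl j, hgij, by simp⟩
        simp only [pvStep, if_pos hgij, hrm, List.filterMap_cons, hF, List.filterMap_nil,
          List.append_nil]
        exact (pv_congr_aux g Q j j (fun hm => absurd hm hijQ)).symm
      · by_cases hcancel : (j, i) ∈ Q ∧ g j i ≥ 1
        · -- the reverse edge was appended earlier: this iteration removes it
          have hji_lt : j < i := by
            rcases lt_or_ge j i with h | h
            · exact h
            · exact absurd hcancel.1 (hjiQ h)
          have hmemL : [i, j] ∈ Q.filterMap (pvF g Q) :=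
            (pv_mem_filterMap hijQ).mpr ⟨hcancel.1, hcancel.2⟩
          have hrm : PySem.List.remove? (Q.filterMap (pvF g Q) ++ [[j, i]]) [i, j]
              = some ((Q.filterMap (pvF g Q)).erase [i, j] ++ [[j, i]]) := by
            rw [PySem.List.remove?_eq_some_erase _ _ (by simp [hmemL]),
                List.erase_append_left _ hmemL]
          have herase : (Q.filterMap (pvF g Q)).erase [i, j]
              = Q.filterMap (pvF g (Q ++ [(i, j)])) := by
            apply pv_erase_filterMap Q _ _ (j, i) [i, j] hcancel.1 (pv_nodup Q hQ)
            · intro p hp hpne; exact pv_shift g Q i j p hpne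
            · unfold pvF
              rw [if_pos]
              refine ⟨hcancel.2, ?_⟩
              rintro ⟨-, -, hm⟩; exact hijQ hm
            · unfold pvF
              rw [if_neg]
              rintro ⟨-, hno⟩
              exact hno ⟨le_of_lt hji_lt, hgij, by simp⟩
            · intro p hp hsome
              obtain ⟨hv, -, -⟩ := pvF_eq_some hsome
              have : i = p.2 ∧ j = p.1 := by simpa using hv
              obtain ⟨a, b⟩ := p; simp_all
          have hF : pvF g (Q ++ [(i, j)]) (i, j) = some [j, i] := by
            unfold pvF
            rw [if_pos]
            exact ⟨hgij, by rintro ⟨hge, -⟩; omega⟩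
          simp only [pvStep, if_pos hgij, hrm, List.filterMap_cons, hF, List.filterMap_nil]
          rw [herase]
        · -- nothing to remove: the reverse edge is absent (or not yet appended)
          have hnotL : [i, j] ∉ Q.filterMap (pvF g Q) := by
            rw [pv_mem_filterMap hijQ]; exact hcancel
          have hne2 : [i, j] ≠ [j, i] := by simp; intro h; exact absurd h.symm hij_eq
          have hrm : PySem.List.remove? (Q.filterMap (pvF g Q) ++ [[j, i]]) [i, j] = none := by
            rw [PySem.List.remove?_eq_none_iff _ _]
            simp only [List.mem_append, List.mem_singleton]
            rintro (h | h)
            · exact hnotL h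
            · exact hne2 h
          have hF : pvF g (Q ++ [(i, j)]) (i, j) = some [j, i] := by
            unfold pvF
            rw [if_pos]
            refine ⟨hgij, ?_⟩
            rintro ⟨hge, hgji, hm⟩
            rcases List.mem_append.mp hm with h | h
            · exact hcancel ⟨h, hgji⟩
            · have : j = i ∧ i = j := by simpa using h
              exact hij_eq this.1
          simp only [pvStep, if_pos hgij, hrm, List.filterMap_cons, hF, List.filterMap_nil]
          rw [pv_congr_aux g Q i j]
          intro hm
          have hgji : ¬ g j i ≥ 1 := fun hg => hcancel ⟨hm, hg⟩
          unfold pvF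
          rw [if_neg (by rintro ⟨hg, -⟩; exact hgji hg), if_neg (by rintro ⟨hg, -⟩; exact hgji hg)]
    · -- e[i][j] < 1: the iteration is a no-op
      have hF : pvF g (Q ++ [(i, j)]) (i, j) = none := by
        unfold pvF
        rw [if_neg]
        rintro ⟨hg, -⟩; exact hgij hg
      simp only [pvStep, if_neg hgij, List.filterMap_cons, hF, List.filterMap_nil,
        List.append_nil]
      rw [pv_congr_aux g Q i j]
      intro hm
      unfold pvF
      apply if_congr _ rfl rfl
      apply and_congr_right
      intro _
      apply not_congr
      constructor
      · rintro ⟨-, hg, -⟩; exact (hgij hg).elim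
      · rintro ⟨-, hg, -⟩; exact (hgij hg).elim

-- the lexicographically sorted list of all index pairs of the double loop
def pvPairs (n : Int) : List (Int × Int) :=
  (PySem.List.pyRange 0 n 1).flatMap (fun i =>
    (PySem.List.pyRange 0 n 1).map (fun j => (i, j)))

theorem pv_pairs_pairwise (n : Int) : (pvPairs n).Pairwise pvLex := by
  unfold pvPairs
  rw [List.pairwise_flatMap]
  constructor
  · intro a _
    apply List.Pairwise.map
    · intro x y hxy
      exact Or.inr ⟨rfl, hxy⟩
    · exact PySem.List.pairwise_lt_pyRange_one 0 n
  · exact (PySem.List.pairwise_lt_pyRange_one 0 n).imp (fun {a b} hab => by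
      intro x hx y hy
      simp only [List.mem_map] at hx hy
      obtain ⟨jx, -, rfl⟩ := hx
      obtain ⟨jy, -, rfl⟩ := hy
      exact Or.inl hab)

theorem pv_mem_pairs (n : Int) (p : Int × Int) :
    p ∈ pvPairs n ↔ (0 ≤ p.1 ∧ p.1 < n ∧ 0 ≤ p.2 ∧ p.2 < n) := by
  unfold pvPairs
  simp only [List.mem_flatMap, List.mem_map, PySem.List.mem_pyRange_one]
  constructor
  · rintro ⟨i, hi, j, hj, rfl⟩
    exact ⟨hi.1, hi.2, hj.1, hj.2⟩
  · rintro ⟨h1, h2, h3, h4⟩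
    exact ⟨p.1, ⟨h1, h2⟩, p.2, ⟨h3, h4⟩, rfl⟩

theorem pv_bridge (e : List (List Int)) :
    symmetricEdge e = symmetricEdge_alt e := by
  have hA : symmetricEdge e
      = (pvPairs (e.length : Int)).foldl
          (pvStep (fun i j => PySem.List.pyGetD (PySem.List.pyGetD e i []) j 0)) [] := by
    unfold pvPairs
    rw [List.foldl_flatMap]
    simp only [List.foldl_map]
    rfl
  have hB : symmetricEdge_alt e
      = (pvPairs (e.length : Int)).filterMap (fun p =>
          if PySem.List.pyGetD (PySem.List.pyGetD e p.1 []) p.2 0 ≥ 1 ∧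
             ¬ (p.2 ≥ p.1 ∧ PySem.List.pyGetD (PySem.List.pyGetD e p.2 []) p.1 0 ≥ 1)
          then some [p.2, p.1] else none) := by
    unfold pvPairs
    rw [List.filterMap_flatMap]
    simp only [List.filterMap_map]
    rfl
  rw [hA, hB, pv_core _ _ (pv_pairs_pairwise _)]
  apply List.filterMap_congr
  intro p hp
  have hmem : (p.2, p.1) ∈ pvPairs (e.length : Int) := by
    rw [pv_mem_pairs] at hp ⊢
    exact ⟨hp.2.2.1, hp.2.2.2, hp.1, hp.2.1⟩
  unfold pvF
  apply if_congr _ rfl rfl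
  apply and_congr_right
  intro _
  apply not_congr
  constructor
  · rintro ⟨h1, h2, -⟩; exact ⟨h1, h2⟩
  · rintro ⟨h1, h2⟩; exact ⟨h1, h2, hmem⟩

-- ===== VERDICT (by name: the statement is the Claim_ definition above) =====
theorem symmetricEdge_spec : Claim_equal_symmetricEdge := by
  intro e _ _
  unfold Spec_symmetricEdge
  exact pv_bridge e
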